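-- pv_equiv track=rewrite | github.com/dcheng2022/advent_of_code_2023 | day1.py | calibrate_words
-- ===== SOURCE A (Python) =====
-- def calibrate_words(line):
--     lptr = 0
--     ldig = None
--     lfound = False
--     rptr = len(line) - 1
--     rdig = None
--     rfound = False
--     words_to_digits = {'one': 1,
--                        'two': 2,
--                        'three': 3,
--                        'four': 4,
--                        'five': 5,
--                        'six': 6,
--                        'seven': 7,
--                        'eight': 8,
--                        'nine': 9}
--
--     while not lfound and lptr < len(line):
--         for (word, digit) in words_to_digits.items():
--             if line[lptr:].startswith(word):
--                 ldig = digit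
--                 lfound = True
--                 lptr -= 1
--                 break
--
--         lptr += 1
--
--     while not rfound and rptr > -1:
--         for (word, digit) in words_to_digits.items():
--             if line[rptr:].startswith(word):
--                 rdig = digit
--                 rfound = True
--                 rptr += 1
--                 break
--
--         rptr -= 1
--
--     numstr = ''.join([str(ldig), str(rdig)])
--
--     return (numstr, lptr, rptr)
-- ===== SOURCE B (Python) =====
-- WORDS = [('one', 1), ('two', 2), ('three', 3), ('four', 4), ('five', 5),
--          ('six', 6), ('seven', 7), ('eight', 8), ('nine', 9)]
--
--
-- def calibrate_words(line):
--     ldig = None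
--     rdig = None
--     lptr = len(line)
--     rptr = -1
--     for i in range(len(line)):
--         digit = next((d for w, d in WORDS if line.startswith(w, i)), None)
--         if digit is not None:
--             if ldig is None:
--                 ldig = digit
--                 lptr = i
--             rdig = digit
--             rptr = i
--     return (str(ldig) + str(rdig), lptr, rptr)
-- ===== Notes on version B (the rewrite author's own statement) =====
-- stated objective: simpler
-- what changed: Replaces A's two separate while loops (a forward scan for the first spelled digit and a backward scan for the last) by a single forward pass that records the first match once and overwrites the last match on every match.
import Mathlib
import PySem

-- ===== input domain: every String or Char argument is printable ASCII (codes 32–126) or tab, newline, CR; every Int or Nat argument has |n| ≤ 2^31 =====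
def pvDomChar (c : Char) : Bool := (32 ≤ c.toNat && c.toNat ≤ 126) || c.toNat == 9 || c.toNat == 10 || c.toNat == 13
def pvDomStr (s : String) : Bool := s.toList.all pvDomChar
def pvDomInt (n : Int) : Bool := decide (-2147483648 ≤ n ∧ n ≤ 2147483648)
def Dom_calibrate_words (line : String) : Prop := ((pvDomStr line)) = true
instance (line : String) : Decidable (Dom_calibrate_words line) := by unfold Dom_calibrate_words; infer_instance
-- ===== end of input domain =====

-- B replaces A's two opposite-direction while loops by one forward pass recording the
-- first and last spelled-digit match (objective: simpler decomposition, same cost).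

-- ===== PORT A =====
-- words_to_digits.items() in insertion order
def pvWordsA : List (List Char × Int) :=
  [(['o','n','e'], 1), (['t','w','o'], 2), (['t','h','r','e','e'], 3), (['f','o','u','r'], 4),
   (['f','i','v','e'], 5), (['s','i','x'], 6), (['s','e','v','e','n'], 7), (['e','i','g','h','t'], 8),
   (['n','i','n','e'], 9)]

-- A's inner 'for (word, digit) in words_to_digits.items(): if <s>.startswith(word): … break'
def pvScanA (s : List Char) : List (List Char × Int) → Option Int
  | [] => none
  | (w, d) :: rest => if PySem.Chars.startswith s w then some d else pvScanA s rest

-- str(ldig): 'None' for None, str(digit) otherwise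
def pvStrA (o : Option Int) : List Char :=
  match o with
  | none => ['N', 'o', 'n', 'e']
  | some d => PySem.Int.toChars d

-- 'while not lfound and lptr < len(line)'; on a match lptr -= 1 then lptr += 1 leaves it unchanged
def pvFwdA (cs : List Char) (lptr : Nat) : Option Int × Nat :=
  if _h : lptr < cs.length then
    match pvScanA (PySem.List.slice cs (some (lptr : Int)) none) pvWordsA with
    | some d => (some d, lptr)
    | none => pvFwdA cs (lptr + 1)
  else (none, lptr)
termination_by cs.length - lptr

-- 'while not rfound and rptr > -1'; on a match rptr += 1 then rptr -= 1 leaves it unchanged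
def pvBwdA (cs : List Char) (rptr : Int) : Option Int × Int :=
  if _h : rptr > -1 then
    match pvScanA (PySem.List.slice cs (some rptr) none) pvWordsA with
    | some d => (some d, rptr)
    | none => pvBwdA cs (rptr - 1)
  else (none, rptr)
termination_by (rptr + 1).toNat
decreasing_by omega

def calibrate_words (line : String) : String × Int × Int :=
  let cs := line.toList
  let l := pvFwdA cs 0
  let r := pvBwdA cs ((cs.length : Int) - 1)
  (String.ofList (pvStrA l.1 ++ pvStrA r.1), (l.2 : Int), r.2)

-- ===== PORT B =====
def pvWordsB : List (List Char × Int) :=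
  [(['o','n','e'], 1), (['t','w','o'], 2), (['t','h','r','e','e'], 3), (['f','o','u','r'], 4),
   (['f','i','v','e'], 5), (['s','i','x'], 6), (['s','e','v','e','n'], 7), (['e','i','g','h','t'], 8),
   (['n','i','n','e'], 9)]

-- 'next((d for w, d in WORDS if line.startswith(w, i)), None)';
-- line.startswith(w, i) with 0 ≤ i is exactly startswith on the i-th suffix
def pvMatchB (cs : List Char) (i : Nat) : Option Int :=
  (pvWordsB.find? (fun p => PySem.Chars.startswith (cs.drop i) p.1)).map Prod.snd

-- B's loop body over state (ldig, lptr, rdig, rptr)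
def pvStepB (cs : List Char) (st : Option Int × Int × Option Int × Int) (i : Nat) :
    Option Int × Int × Option Int × Int :=
  match pvMatchB cs i with
  | some d =>
    match st.1 with
    | none => (some d, (i : Int), some d, (i : Int))
    | some _ => (st.1, st.2.1, some d, (i : Int))
  | none => st

def pvStrB (o : Option Int) : List Char :=
  match o with
  | none => ['N', 'o', 'n', 'e']
  | some d => PySem.Int.toChars d

def calibrate_words_alt (line : String) : String × Int × Int :=
  let cs := line.toList
  let st := (List.range cs.length).foldl (pvStepB cs) (none, (cs.length : Int), none, -1)
  (String.ofList (pvStrB st.1 ++ pvStrB st.2.2.1), st.2.1, st.2.2.2)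

-- ===== PRECONDITION & SPEC =====
def Spec_calibrate_words (line : String) (out : String × Int × Int) : Prop := out = calibrate_words_alt line
instance (line : String) (out : String × Int × Int) : Decidable (Spec_calibrate_words line out) := by unfold Spec_calibrate_words; infer_instance

-- ===== CLAIM (what is proved, stated in full; the proofs are below) =====
def Claim_equal_calibrate_words : Prop := ∀ (line : String), Dom_calibrate_words line → Spec_calibrate_words line (calibrate_words line)

-- ===== LEMMAS AND PROOFS =====

-- the match at index i, paired with i
def pvPM (cs : List Char) (i : Nat) : Option (Int × Nat) :=
  (pvScanA (List.drop i cs) pvWordsA).map (fun d => (d, i))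

theorem pvScanA_eq_find (s : List Char) (ws : List (List Char × Int)) :
    pvScanA s ws = (ws.find? (fun p => PySem.Chars.startswith s p.1)).map Prod.snd := by
  induction ws with
  | nil => rfl
  | cons p rest ih =>
    obtain ⟨w, d⟩ := p
    simp only [pvScanA, List.find?]
    by_cases h : PySem.Chars.startswith s w = true
    · simp [h]
    · simp [h, ih]

theorem pvMatchB_eq_scan (cs : List Char) (i : Nat) :
    pvMatchB cs i = pvScanA (List.drop i cs) pvWordsA := by
  rw [pvMatchB, pvScanA_eq_find, show pvWordsB = pvWordsA from rfl]

theorem pvFwdA_char (cs : List Char) (k : Nat) (hk : k ≤ cs.length) :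
    pvFwdA cs k =
      match ((List.range' k (cs.length - k)).filterMap (pvPM cs)).head? with
      | some p => (some p.1, p.2)
      | none => (none, cs.length) := by
  generalize hn : cs.length - k = n
  induction n generalizing k with
  | zero =>
    have hk' : k = cs.length := by omega
    rw [pvFwdA]
    simp [hk', List.range']
  | succ n ih =>
    have hk' : k < cs.length := by omega
    rw [pvFwdA]
    simp only [hk', dif_pos, PySem.List.slice_from_natCast]
    rw [List.range'_succ, List.filterMap_cons]
    cases h : pvScanA (List.drop k cs) pvWordsA with
    | some d => simp [pvPM, h]
    | none =>
      simp only [pvPM, h, Option.map_none]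
      exact ih (k + 1) (by omega) (by omega)

theorem pvBwdA_char (cs : List Char) (j : Nat) (hj : j ≤ cs.length) :
    pvBwdA cs ((j : Int) - 1) =
      match ((List.range j).filterMap (pvPM cs)).getLast? with
      | some p => (some p.1, (p.2 : Int))
      | none => (none, -1) := by
  induction j with
  | zero =>
    rw [pvBwdA]
    simp [List.range_zero]
  | succ j ih =>
    have harg : ((j + 1 : Nat) : Int) - 1 = (j : Int) := by push_cast; ring
    rw [harg, pvBwdA]
    have hpos : ((j : Int) > -1) := by omega
    simp only [hpos, dif_pos, PySem.List.slice_from_natCast]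
    rw [List.range_succ, List.filterMap_append, List.filterMap_cons]
    cases h : pvScanA (List.drop j cs) pvWordsA with
    | some d => simp [pvPM, h]
    | none =>
      simp only [pvPM, h, Option.map_none, List.filterMap_nil, List.append_nil]
      have := ih (by omega)
      rw [show (j : Int) - 1 = ((j : Nat) : Int) - 1 from rfl] at this
      exact this

-- B's fold over range n computes (first match, last match) of the first n indices
theorem pvFoldB_char (cs : List Char) (n : Nat) :
    (List.range n).foldl (pvStepB cs) (none, (cs.length : Int), none, -1) =
      ((match ((List.range n).filterMap (pvPM cs)).head? with
        | some p => (some p.1 : Option Int)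
        | none => none),
       (match ((List.range n).filterMap (pvPM cs)).head? with
        | some p => ((p.2 : Int) : Int)
        | none => (cs.length : Int)),
       (match ((List.range n).filterMap (pvPM cs)).getLast? with
        | some p => (some p.1 : Option Int)
        | none => none),
       (match ((List.range n).filterMap (pvPM cs)).getLast? with
        | some p => ((p.2 : Int) : Int)
        | none => (-1 : Int))) := by
  induction n with
  | zero => simp [List.range_zero]
  | succ n ih =>
    rw [List.range_succ, List.foldl_append, ih, List.filterMap_append, List.filterMap_cons]
    simp only [List.foldl_cons, List.foldl_nil, pvStepB, pvMatchB_eq_scan]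
    cases h : pvScanA (List.drop n cs) pvWordsA with
    | none =>
      have hp : pvPM cs n = none := by simp [pvPM, h]
      simp [hp]
    | some d =>
      have hp : pvPM cs n = some (d, n) := by simp [pvPM, h]
      simp only [hp, List.filterMap_nil, List.getLast?_concat]
      cases hh : ((List.range n).filterMap (pvPM cs)).head? with
      | none =>
        have hnil : (List.range n).filterMap (pvPM cs) = [] := by
          simpa using hh
        rw [hnil]
        simp
      | some p =>
        obtain ⟨t, ht⟩ := List.head?_eq_some_iff.mp hh
        rw [ht]
        simp

theorem pvStrB_eq (o : Option Int) : pvStrB o = pvStrA o := by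
  cases o <;> rfl

-- ===== VERDICT (by name: the statement is the Claim_ definition above) =====
theorem calibrate_words_spec : Claim_equal_calibrate_words := by
  intro line _
  show calibrate_words line = calibrate_words_alt line
  simp only [calibrate_words, calibrate_words_alt]
  rw [pvFwdA_char line.toList 0 (Nat.zero_le _),
      pvBwdA_char line.toList line.toList.length le_rfl,
      pvFoldB_char line.toList line.toList.length]
  rw [Nat.sub_zero, ← List.range_eq_range']
  cases hM : ((List.range line.toList.length).filterMap (pvPM line.toList)).head? <;>
  cases hL : ((List.range line.toList.length).filterMap (pvPM line.toList)).getLast? <;>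
    simp [pvStrB_eq]
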